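-- pv_equiv track=rewrite | github.com/aiden-tepper/euphony-cli | voice_leading/helpers/trimmers.py | parallel_contrary_octaves
-- ===== SOURCE A (Python) =====
-- def octave(a, b):
--     return b - a % 12 == 0
--
-- def parallel_contrary_octaves(prev, options):
--     trimmed = []
--     octaves = []
--     for a in range(4):
--         for b in range(a+1, 4):
--             if octave(prev[a], prev[b]):
--                 octaves.append((a, b))
--     for curr in options:
--         valid = True
--         for (a, b) in octaves:
--             if octave(prev[a], prev[b]):
--                 valid = False
--         if valid:
--             trimmed.append(curr)
--     return trimmed
-- ===== SOURCE B (Python) =====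
-- def octave(a, b):
--     return b - a % 12 == 0
--
--
-- def parallel_contrary_octaves(prev, options):
--     bad = any(octave(prev[a], prev[b]) for a in range(4) for b in range(a + 1, 4))
--     return [] if bad else list(options)
-- ===== Notes on version B (the rewrite author's own statement) =====
-- stated objective: simpler
-- what changed: A builds a list of octave index pairs and then re-validates it once per option in a nested filter loop; B computes a single boolean flag over the six index pairs and returns either [] or a copy of options, removing the per-option loop entirely (A's octave re-check makes validity independent of the option).
-- outside the precondition, e.g. on parallel_contrary_octaves([1, 2, 3], [[1, 2, 3, 4]]): A raises IndexError, B raises IndexError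
import Mathlib
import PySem

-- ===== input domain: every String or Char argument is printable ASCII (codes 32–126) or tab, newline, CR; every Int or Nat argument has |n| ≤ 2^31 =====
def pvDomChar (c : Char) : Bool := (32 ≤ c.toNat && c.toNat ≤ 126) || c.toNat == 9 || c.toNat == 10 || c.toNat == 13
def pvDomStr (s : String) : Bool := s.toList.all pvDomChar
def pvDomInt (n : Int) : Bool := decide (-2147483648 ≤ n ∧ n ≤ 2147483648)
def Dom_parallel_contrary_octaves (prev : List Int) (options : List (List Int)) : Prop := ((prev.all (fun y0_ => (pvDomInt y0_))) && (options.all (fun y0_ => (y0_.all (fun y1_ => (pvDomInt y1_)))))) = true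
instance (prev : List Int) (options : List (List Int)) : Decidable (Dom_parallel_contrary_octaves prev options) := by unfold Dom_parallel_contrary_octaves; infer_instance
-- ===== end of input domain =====

-- B replaces A's build-pair-list-then-filter-options nested loops by a single boolean flag over
-- the six index pairs, returning [] or a copy of options (A's re-check makes validity option-independent).

-- ===== PORT A =====
-- octave(a, b) — keeps Python's precedence: b - (a % 12) == 0
def pvOctave (a b : Int) : Bool := b - PySem.Int.mod a 12 == 0

def parallel_contrary_octaves (prev : List Int) (options : List (List Int)) : List (List Int) :=
  let octaves : List (Int × Int) :=
    (PySem.List.pyRange 0 4 1).foldl (fun oc a =>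
      (PySem.List.pyRange (a + 1) 4 1).foldl (fun oc b =>
        if pvOctave (PySem.List.pyGetD prev a 0) (PySem.List.pyGetD prev b 0) then
          oc ++ [(a, b)]
        else oc) oc) []
  options.foldl (fun tr curr =>
    let valid := octaves.foldl (fun v p =>
      if pvOctave (PySem.List.pyGetD prev p.1 0) (PySem.List.pyGetD prev p.2 0) then false else v) true
    if valid then tr ++ [curr] else tr) []

-- ===== PORT B =====
-- B's own copy of octave (Source B defines it itself), same Python precedence
def pvOctaveB (a b : Int) : Bool := b - PySem.Int.mod a 12 == 0

def parallel_contrary_octaves_alt (prev : List Int) (options : List (List Int)) : List (List Int) :=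
  let bad := (PySem.List.pyRange 0 4 1).any (fun a =>
    (PySem.List.pyRange (a + 1) 4 1).any (fun b =>
      pvOctaveB (PySem.List.pyGetD prev a 0) (PySem.List.pyGetD prev b 0)))
  if bad then [] else options

-- ===== PRECONDITION & SPEC =====
-- A indexes prev[0]..prev[3] unconditionally, so it raises IndexError (and B raises too) when prev has fewer than 4 elements.
def Pre_parallel_contrary_octaves (prev : List Int) (_options : List (List Int)) : Prop := 4 ≤ prev.length
instance (prev : List Int) (options : List (List Int)) : Decidable (Pre_parallel_contrary_octaves prev options) := by unfold Pre_parallel_contrary_octaves; infer_instance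
def pvWitness_parallel_contrary_octaves : List Int × List (List Int) := ([0, 1, 2, 3], [[1, 2, 3, 4]])

def Spec_parallel_contrary_octaves (prev : List Int) (options : List (List Int)) (out : List (List Int)) : Prop := out = parallel_contrary_octaves_alt prev options
instance (prev : List Int) (options : List (List Int)) (out : List (List Int)) : Decidable (Spec_parallel_contrary_octaves prev options out) := by unfold Spec_parallel_contrary_octaves; infer_instance

-- ===== CLAIM (what is proved, stated in full; the proofs are below) =====
def Claim_equal_parallel_contrary_octaves : Prop := ∀ (prev : List Int) (options : List (List Int)), Dom_parallel_contrary_octaves prev options → Pre_parallel_contrary_octaves prev options → Spec_parallel_contrary_octaves prev options (parallel_contrary_octaves prev options)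

-- ===== LEMMAS AND PROOFS =====
theorem pvOctaveB_eq (a b : Int) : pvOctaveB a b = pvOctave a b := rfl

theorem pv_flatten_singleton {α : Type} (l : List α) :
    (List.map (fun x => [x]) l).flatten = l := by
  induction l with
  | nil => rfl
  | cons x xs ih => simp [ih]

theorem parallel_contrary_octaves_eq (prev : List Int) (options : List (List Int))
    (h : 4 ≤ prev.length) :
    parallel_contrary_octaves prev options = parallel_contrary_octaves_alt prev options := by
  obtain ⟨p0, p1, p2, p3, t, rfl⟩ :
      ∃ p0 p1 p2 p3 t, prev = p0 :: p1 :: p2 :: p3 :: t := by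
    match prev, h with
    | p0 :: p1 :: p2 :: p3 :: t, _ => exact ⟨p0, p1, p2, p3, t, rfl⟩
  have r0 : PySem.List.pyRange 0 4 1 = [0, 1, 2, 3] := by decide
  have r1 : PySem.List.pyRange (0 + 1) 4 1 = [1, 2, 3] := by decide
  have r2 : PySem.List.pyRange (1 + 1) 4 1 = [2, 3] := by decide
  have r3 : PySem.List.pyRange (2 + 1) 4 1 = [3] := by decide
  have r4 : PySem.List.pyRange (3 + 1) 4 1 = [] := by decide
  have g0 : PySem.List.pyGetD (p0 :: p1 :: p2 :: p3 :: t) (0 : Int) 0 = p0 := by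
    simp [PySem.List.pyGetD_ofNat']
  have g1 : PySem.List.pyGetD (p0 :: p1 :: p2 :: p3 :: t) (1 : Int) 0 = p1 := by
    simp [PySem.List.pyGetD_ofNat']
  have g2 : PySem.List.pyGetD (p0 :: p1 :: p2 :: p3 :: t) (2 : Int) 0 = p2 := by
    simp [PySem.List.pyGetD_ofNat']
  have g3 : PySem.List.pyGetD (p0 :: p1 :: p2 :: p3 :: t) (3 : Int) 0 = p3 := by
    simp [PySem.List.pyGetD_ofNat']
  unfold parallel_contrary_octaves parallel_contrary_octaves_alt
  rw [r0]
  simp only [List.foldl, List.any_cons, List.any_nil, r1, r2, r3, r4, g0, g1, g2, g3]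
  by_cases h01 : pvOctave p0 p1 = true <;>
  by_cases h02 : pvOctave p0 p2 = true <;>
  by_cases h03 : pvOctave p0 p3 = true <;>
  by_cases h12 : pvOctave p1 p2 = true <;>
  by_cases h13 : pvOctave p1 p3 = true <;>
  by_cases h23 : pvOctave p2 p3 = true <;>
  simp [h01, h02, h03, h12, h13, h23, g0, g1, g2, g3, List.foldl, pvOctaveB_eq, pv_flatten_singleton]

-- ===== VERDICT (by name: the statement is the Claim_ definition above) =====
theorem parallel_contrary_octaves_spec : Claim_equal_parallel_contrary_octaves := by
  intro prev options _ hpre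
  unfold Spec_parallel_contrary_octaves
  exact parallel_contrary_octaves_eq prev options hpre
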